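-- pv_equiv track=rewrite | github.com/KeyboardMaestro/AlgorithmPython | source/Ranking.py | solution
-- ===== SOURCE A (Python) =====
-- def solution(score):
--     ranking = []
--     rank = []
--     for sc in score:
--         rank.append(sum(sc))
--     data = sorted(rank,reverse=True)
--     for temp in rank:
--         ranking.append(data.index(temp)+1)
--     return ranking
-- ===== SOURCE B (Python) =====
-- def solution(score):
--     sums = [sum(sc) for sc in score]
--     return [1 + sum(1 for u in sums if u > v) for v in sums]
-- ===== Notes on version B (the rewrite author's own statement) =====
-- stated objective: alternative
-- what changed: no sorting at all: the rank of a row is computed directly as 1 + the number of row sums strictly greater than it (order statistic by counting), instead of sorting and taking the first index in the sorted list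
import Mathlib
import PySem

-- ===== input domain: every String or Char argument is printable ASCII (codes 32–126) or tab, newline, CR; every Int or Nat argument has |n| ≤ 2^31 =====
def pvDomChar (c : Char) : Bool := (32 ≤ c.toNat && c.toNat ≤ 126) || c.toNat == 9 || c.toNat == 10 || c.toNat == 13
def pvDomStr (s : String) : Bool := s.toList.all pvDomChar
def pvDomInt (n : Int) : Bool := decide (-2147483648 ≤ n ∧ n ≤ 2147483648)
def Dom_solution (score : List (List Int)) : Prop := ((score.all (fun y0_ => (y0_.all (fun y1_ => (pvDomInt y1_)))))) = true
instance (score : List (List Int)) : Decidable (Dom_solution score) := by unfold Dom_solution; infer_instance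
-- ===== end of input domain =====

-- B computes each rank directly as 1 + (number of strictly greater row sums), with no
-- sort and no index scan (objective: alternative algorithm, same asymptotic cost).


-- ===== PORT A =====
-- data.index(temp) always succeeds (temp ∈ data, a permutation of rank), so .getD 0 is exact.
def solution (score : List (List Int)) : List Int :=
  let rank := score.foldl (fun r sc => r ++ [sc.sum]) ([] : List Int)
  let data := PySem.List.sorted rank (fun x => x) true
  rank.foldl (fun out temp => out ++ [((PySem.List.index? data temp).getD 0 : Int) + 1]) []

-- ===== PORT B =====
-- 'sum(1 for u in sums if u > v)' is sums.countP (v < ·), cast to Int.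
def solution_alt (score : List (List Int)) : List Int :=
  let sums := score.map (fun sc => sc.sum)
  sums.map (fun v => 1 + ((sums.countP (fun u => decide (v < u)) : Nat) : Int))

-- ===== PRECONDITION & SPEC =====
def Spec_solution (score : List (List Int)) (out : List Int) : Prop := out = solution_alt score
instance (score : List (List Int)) (out : List Int) : Decidable (Spec_solution score out) := by unfold Spec_solution; infer_instance

-- ===== CLAIM (what is proved, stated in full; the proofs are below) =====
def Claim_equal_solution : Prop := ∀ (score : List (List Int)), Dom_solution score → Spec_solution score (solution score)

-- ===== LEMMAS AND PROOFS =====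

-- In a list sorted in non-increasing order, the first index of a member v equals the
-- number of elements strictly greater than v.
lemma index_sorted_desc_eq_count (l : List Int) (v : Int)
    (hs : l.Pairwise (fun a b => b ≤ a)) (hv : v ∈ l) :
    PySem.List.index? l v = some (l.countP (fun u => decide (v < u))) := by
  induction l with
  | nil => cases hv
  | cons x xs ih =>
    rcases List.pairwise_cons.mp hs with ⟨hx, hxs⟩
    by_cases hxv : x = v
    · subst hxv
      have hnone : ∀ u ∈ xs, ¬ x < u := fun u hu => not_lt.mpr (hx u hu)
      rw [PySem.List.index?_cons_self]
      have : xs.countP (fun u => decide (x < u)) = 0 :=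
        List.countP_eq_zero.mpr (by intro u hu; simpa using hnone u hu)
      simp [this]
    · have hvxs : v ∈ xs := by
        rcases List.mem_cons.mp hv with h | h
        · exact absurd h.symm hxv
        · exact h
      have hxgt : v < x := lt_of_le_of_ne (hx v hvxs) (fun h => hxv h.symm)
      rw [PySem.List.index?_cons_of_ne xs (fun h => hxv h)]
      rw [ih hxs hvxs]
      simp [hxgt, Nat.add_comm]

-- ===== VERDICT (by name: the statement is the Claim_ definition above) =====
theorem solution_spec : Claim_equal_solution := by
  intro score _
  show solution score = solution_alt score
  unfold solution solution_alt
  rw [PySem.List.foldl_append_singleton_eq_map, PySem.List.foldl_append_singleton_eq_map]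
  simp only [List.nil_append]
  apply List.map_congr_left
  intro v hv
  have hperm : (PySem.List.sorted (score.map (fun sc => sc.sum)) (fun x => x) true).Perm
      (score.map (fun sc => sc.sum)) := PySem.List.sorted_perm _ _ _
  have hmem : v ∈ PySem.List.sorted (score.map (fun sc => sc.sum)) (fun x => x) true :=
    hperm.mem_iff.mpr hv
  have hpw : (PySem.List.sorted (score.map (fun sc => sc.sum)) (fun x => x) true).Pairwise
      (fun a b => b ≤ a) := PySem.List.sorted_pairwise_rev _ _
  rw [index_sorted_desc_eq_count _ v hpw hmem]
  rw [hperm.countP_eq]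
  simp [Int.add_comm]
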